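-- pv_equiv track=rewrite | github.com/JnanaPhani/vibration_auto_mode | sensor_config.py | _decode_ascii_words
-- ===== SOURCE A (Python) =====
-- from typing import Dict, List, Optional
--
-- def _decode_ascii_words(words: List[int], little_endian: bool = True) -> str:
--     chars: List[str] = []
--     for word in words:
--         low = word & 0xFF
--         high = (word >> 8) & 0xFF
--         order = (low, high) if little_endian else (high, low)
--         for byte in order:
--             if byte != 0x00:
--                 chars.append(chr(byte))
--     return "".join(chars).strip()
-- ===== SOURCE B (Python) =====
-- def _decode_ascii_words(words, little_endian=True):
--     # Columnwise: extract the low-byte column and the high-byte column as two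
--     # latin-1 strings, interleave them with zip in endianness order, then
--     # bulk-remove NULs and strip.
--     lows = bytes(w & 0xFF for w in words).decode("latin-1")
--     highs = bytes((w >> 8) & 0xFF for w in words).decode("latin-1")
--     first, second = (lows, highs) if little_endian else (highs, lows)
--     merged = "".join(x + y for x, y in zip(first, second))
--     return merged.replace("\x00", "").strip()
-- ===== Notes on version B (the rewrite author's own statement) =====
-- stated objective: alternative
-- what changed: Replaces A's single per-word loop with an inner filtering branch by a columnwise (structure-of-arrays) decomposition: two independent passes extract the low-byte column and the high-byte column as latin-1 strings, a zip interleaves the two columns in endianness order, and NUL removal and stripping are done in bulk at the end.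
import Mathlib
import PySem

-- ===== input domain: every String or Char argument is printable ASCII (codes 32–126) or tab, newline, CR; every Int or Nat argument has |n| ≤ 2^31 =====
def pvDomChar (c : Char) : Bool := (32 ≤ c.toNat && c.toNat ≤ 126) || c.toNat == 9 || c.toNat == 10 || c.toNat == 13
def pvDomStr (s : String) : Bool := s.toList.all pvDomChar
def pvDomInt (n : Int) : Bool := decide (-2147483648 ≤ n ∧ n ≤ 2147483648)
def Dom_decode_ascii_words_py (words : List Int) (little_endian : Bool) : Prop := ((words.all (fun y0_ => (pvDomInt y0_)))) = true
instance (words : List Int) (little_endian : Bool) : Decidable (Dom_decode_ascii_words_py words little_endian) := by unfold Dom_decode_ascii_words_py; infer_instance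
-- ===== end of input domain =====

-- B decodes columnwise: low-byte and high-byte columns extracted in two separate passes, zipped in endianness order, then NULs removed and stripped in bulk.


-- ===== PORT A =====
def decode_ascii_words_py (words : List Int) (little_endian : Bool) : String :=
  let chars : List Char := words.foldl (fun chars word =>
    let low := PySem.Int.band word 255
    let high := PySem.Int.band (word >>> (8 : Nat)) 255
    let order := if little_endian then (low, high) else (high, low)
    [order.1, order.2].foldl (fun chars byte =>
      if byte ≠ 0 then chars ++ [Char.ofNat byte.toNat] else chars) chars) []
  String.mk (PySem.Chars.strip chars)

-- ===== PORT B =====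
def decode_ascii_words_py_alt (words : List Int) (little_endian : Bool) : String :=
  -- two columnwise passes; latin-1 decode of byte b is the char with code b
  let lows : List Char := words.map (fun w => Char.ofNat (PySem.Int.band w 255).toNat)
  let highs : List Char := words.map (fun (w : Int) => Char.ofNat (PySem.Int.band (w >>> (8 : Nat)) 255).toNat)
  let fs := if little_endian then (lows, highs) else (highs, lows)
  let merged : List Char := (List.zip fs.1 fs.2).flatMap (fun p => [p.1, p.2])
  String.mk (PySem.Chars.strip (PySem.Chars.replace merged ['\x00'] []))

-- ===== PRECONDITION & SPEC =====
def Spec_decode_ascii_words_py (words : List Int) (little_endian : Bool) (out : String) : Prop := out = decode_ascii_words_py_alt words little_endian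
instance (words : List Int) (little_endian : Bool) (out : String) : Decidable (Spec_decode_ascii_words_py words little_endian out) := by unfold Spec_decode_ascii_words_py; infer_instance

-- ===== CLAIM (what is proved, stated in full; the proofs are below) =====
def Claim_equal_decode_ascii_words_py : Prop := ∀ (words : List Int) (little_endian : Bool), Dom_decode_ascii_words_py words little_endian → Spec_decode_ascii_words_py words little_endian (decode_ascii_words_py words little_endian)

-- ===== LEMMAS AND PROOFS =====

-- the per-word byte pair, in endianness order
def pvPair (little_endian : Bool) (word : Int) : List Int :=
  let lo := PySem.Int.band word 255
  let hi := PySem.Int.band (word >>> (8 : Nat)) 255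
  if little_endian then [lo, hi] else [hi, lo]

lemma band255_bounds (a : Int) : 0 ≤ PySem.Int.band a 255 ∧ PySem.Int.band a 255 < 256 := by
  unfold PySem.Int.band
  split_ifs with h1 h2 h2
  · have := Nat.and_le_right (n := a.toNat) (m := (255 : Int).toNat); omega
  · omega
  · have := Nat.and_le_left (n := (255 : Int).toNat) (m := (-a - 1).toNat)
    simp at *; omega
  · omega

lemma pair_bounds (le : Bool) (w : Int) : ∀ b ∈ pvPair le w, 0 ≤ b ∧ b < 256 := by
  intro b hb
  unfold pvPair at hb
  rcases le with _ | _ <;> simp at hb <;>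
    rcases hb with h | h <;> subst h <;> exact band255_bounds _

set_option maxRecDepth 4096 in
lemma chr_eq_nul (n : Nat) (h : n < 256) : (Char.ofNat n = '\x00') ↔ (n = 0) := by
  revert h
  have : ∀ m : Nat, m < 256 → ((Char.ofNat m = '\x00') ↔ (m = 0)) := by decide
  exact this n

-- A's loop: accumulator form
lemma a_loop (le : Bool) : ∀ (ws : List Int) (acc : List Char),
    ws.foldl (fun chars word =>
      let low := PySem.Int.band word 255
      let high := PySem.Int.band (word >>> (8 : Nat)) 255
      let order := if le then (low, high) else (high, low)
      [order.1, order.2].foldl (fun chars byte =>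
        if byte ≠ 0 then chars ++ [Char.ofNat byte.toNat] else chars) chars) acc
    = acc ++ ((ws.flatMap (pvPair le)).filter (fun b => b ≠ 0)).map
        (fun b => Char.ofNat b.toNat) := by
  intro ws
  induction ws with
  | nil => intro acc; simp
  | cons w t ih =>
    intro acc
    rw [List.foldl_cons, ih]
    simp only [List.flatMap_cons, List.filter_append, List.map_append, ← List.append_assoc]
    congr 1
    rcases le with _ | _ <;>
      simp [pvPair] <;> split_ifs <;> simp_all

-- B's zip-merge of two equal-length column maps is a flatMap of the pairs
lemma zip_map_flat (f g : Int → Char) : ∀ (ws : List Int),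
    (List.zip (ws.map f) (ws.map g)).flatMap (fun p => [p.1, p.2])
      = ws.flatMap (fun w => [f w, g w]) := by
  intro ws
  induction ws with
  | nil => simp
  | cons w t ih => simpa [List.zip, List.zipWith] using ih

-- replace s [c] "" removes every occurrence of c
lemma replace_go_single (c : Char) : ∀ (fuel : Nat) (l acc : List Char),
    l.length ≤ fuel →
    PySem.Chars.replace.go [c] [] fuel l acc = acc.reverse ++ l.filter (fun x => x ≠ c) := by
  intro fuel
  induction fuel with
  | zero =>
    intro l acc h
    have : l = [] := by cases l <;> simp_all
    subst this; simp [PySem.Chars.replace.go]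
  | succ f ih =>
    intro l acc h
    cases l with
    | nil => simp [PySem.Chars.replace.go]
    | cons x t =>
      simp only [PySem.Chars.replace.go]
      by_cases hx : x = c
      · subst hx
        have hpre : [x].isPrefixOf (x :: t) = true := by simp [List.isPrefixOf]
        simp only [hpre, if_pos]
        rw [ih] <;> simp_all
      · have hpre : [c].isPrefixOf (x :: t) = false := by simp [List.isPrefixOf]; exact fun h' => (hx h'.symm).elim
        simp only [hpre, Bool.false_eq_true, if_false]
        rw [ih t (x :: acc) (by simp at h ⊢; omega)]
        simp [hx]

lemma replace_single (c : Char) (s : List Char) :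
    PySem.Chars.replace s [c] [] = s.filter (fun x => x ≠ c) := by
  unfold PySem.Chars.replace
  simp only [List.isEmpty_cons, Bool.false_eq_true, if_false]
  exact replace_go_single c s.length s [] (le_refl _)

-- filtering bytes then decoding = decoding then removing NULs (bytes all in 0..255)
lemma filter_map_chr (l : List Int) (hb : ∀ b ∈ l, 0 ≤ b ∧ b < 256) :
    (l.map (fun b => Char.ofNat b.toNat)).filter (fun x => x ≠ '\x00')
      = (l.filter (fun b => b ≠ 0)).map (fun b => Char.ofNat b.toNat) := by
  rw [List.filter_map]
  congr 1
  apply List.filter_congr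
  intro b hbmem
  have ⟨h0, h255⟩ := hb b hbmem
  have hlt : b.toNat < 256 := by omega
  simp [Function.comp, chr_eq_nul b.toNat hlt]
  simp only [← decide_not, decide_eq_decide]
  omega

-- ===== VERDICT (by name: the statement is the Claim_ definition above) =====
theorem decode_ascii_words_py_spec : Claim_equal_decode_ascii_words_py := by
  intro words le _
  unfold Spec_decode_ascii_words_py decode_ascii_words_py decode_ascii_words_py_alt
  have hb : ∀ b ∈ words.flatMap (pvPair le), 0 ≤ b ∧ b < 256 := by
    intro b hbm
    rcases List.mem_flatMap.mp hbm with ⟨w, _, hw⟩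
    exact pair_bounds le w b hw
  simp only [a_loop, List.nil_append, replace_single, ← filter_map_chr _ hb]
  rcases le with _ | _ <;>
    simp only [Bool.false_eq_true, if_true, if_false, zip_map_flat] <;>
    simp [pvPair, List.map_flatMap]
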